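-- pv_equiv track=rewrite | github.com/ljj7975/slurm-experimenter | script_generator.py | get_next_combination
-- ===== SOURCE A (Python) =====
-- def get_next_combination(comb, base):
--     if len(comb) < 1:
--         return []
--
--     next_comb = comb
--     if comb[0] > 0:
--         comb[0] -= 1
--     else:
--         remaining = get_next_combination(comb[1:], base[1:])
--         next_comb = [base[0]] + remaining
--
--     return next_comb
-- ===== SOURCE B (Python) =====
-- def get_next_combination(comb, base):
--     # Single left-to-right pass: decrement the first positive digit and
--     # reset all positions before it to their base value; if no digit is
--     # positive, every position resets. (Does not mutate comb, unlike A.)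
--     for i, v in enumerate(comb):
--         if v > 0:
--             return base[:i] + [v - 1] + comb[i + 1:]
--     return base[:len(comb)]
-- ===== Notes on version B (the rewrite author's own statement) =====
-- stated objective: faster
-- what changed: Replaces A's recursion with per-level list slicing/concatenation (quadratic copying) by one iterative scan that finds the first positive digit and builds the result with a single slice-and-concatenate; B also does not mutate comb.
import Mathlib
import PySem

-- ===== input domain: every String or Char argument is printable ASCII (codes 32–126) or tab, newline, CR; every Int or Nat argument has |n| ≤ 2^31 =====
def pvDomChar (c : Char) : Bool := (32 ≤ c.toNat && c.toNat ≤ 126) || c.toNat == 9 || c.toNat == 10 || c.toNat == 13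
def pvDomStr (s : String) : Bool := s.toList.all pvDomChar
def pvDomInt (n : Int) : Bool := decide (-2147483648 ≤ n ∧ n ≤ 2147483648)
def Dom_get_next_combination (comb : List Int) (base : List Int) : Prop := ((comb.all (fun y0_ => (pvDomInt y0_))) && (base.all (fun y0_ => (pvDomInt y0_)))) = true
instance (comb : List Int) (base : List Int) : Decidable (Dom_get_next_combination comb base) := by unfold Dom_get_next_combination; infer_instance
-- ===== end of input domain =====

-- B replaces A's recursion (which re-slices the lists at every level) by one linear scan; equivalence is
-- about the RETURN value only: Python A mutates comb[0] in place when comb[0] > 0, B never mutates.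

-- ===== PORT A =====
-- Literal recursion of A: empty → []; head positive → decrement head; else base[0] :: recurse on tails.
-- Where Python A would raise IndexError (base exhausted while comb's head is ≤ 0) the port returns [];
-- exactly those inputs are excluded by Pre_get_next_combination.
def get_next_combination : List Int → List Int → List Int
  | [], _ => []
  | c :: cs, base =>
    if c > 0 then (c - 1) :: cs
    else
      match base with
      | [] => []          -- Python raises IndexError here (outside Pre_)
      | b :: bs => b :: get_next_combination cs bs

-- ===== PORT B =====
-- the enumerate loop of Source B: first index i with comb[i] > 0 (and that value), or none
def altFind : List Int → Nat → Option (Nat × Int)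
  | [], _ => none
  | v :: rest, i => if v > 0 then some (i, v) else altFind rest (i + 1)

def get_next_combination_alt (comb : List Int) (base : List Int) : List Int :=
  match altFind comb 0 with
  | some (i, v) => base.take i ++ [v - 1] ++ comb.drop (i + 1)   -- base[:i] + [v-1] + comb[i+1:]
  | none => base.take comb.length                                 -- base[:len(comb)]

-- ===== PRECONDITION & SPEC =====
-- Exactly the inputs on which Python A returns: A raises IndexError iff base is shorter than comb's
-- run of leading non-positive digits.
def Pre_get_next_combination (comb : List Int) (base : List Int) : Prop :=
  (comb.takeWhile (fun x => decide (x ≤ 0))).length ≤ base.length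
instance (comb : List Int) (base : List Int) : Decidable (Pre_get_next_combination comb base) := by
  unfold Pre_get_next_combination; infer_instance

def pvWitness_get_next_combination : List Int × List Int := ([0, 2, 1], [3, 3, 3])

def Spec_get_next_combination (comb : List Int) (base : List Int) (out : List Int) : Prop := out = get_next_combination_alt comb base
instance (comb : List Int) (base : List Int) (out : List Int) : Decidable (Spec_get_next_combination comb base out) := by unfold Spec_get_next_combination; infer_instance

-- ===== CLAIM (what is proved, stated in full; the proofs are below) =====
def Claim_equal_get_next_combination : Prop := ∀ (comb : List Int) (base : List Int), Dom_get_next_combination comb base → Pre_get_next_combination comb base → Spec_get_next_combination comb base (get_next_combination comb base)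

-- ===== LEMMAS AND PROOFS =====

theorem altFind_shift (cs : List Int) (i : Nat) :
    altFind cs (i + 1) = (altFind cs i).map (fun p => (p.1 + 1, p.2)) := by
  induction cs generalizing i with
  | nil => simp [altFind]
  | cons v rest ih =>
    by_cases h : v > 0 <;> simp [altFind, h, ih]

theorem main_equiv (comb base : List Int) (hpre : Pre_get_next_combination comb base) :
    get_next_combination comb base = get_next_combination_alt comb base := by
  induction comb generalizing base with
  | nil => simp [get_next_combination, get_next_combination_alt, altFind]
  | cons c cs ih =>
    by_cases hc : c > 0
    · simp [get_next_combination, get_next_combination_alt, altFind, hc]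
    · -- c ≤ 0 : Pre forces base nonempty
      unfold Pre_get_next_combination at hpre
      have hle : c ≤ 0 := not_lt.mp hc
      simp [List.takeWhile, hle] at hpre
      cases base with
      | nil => simp at hpre
      | cons b bs =>
        have hpre' : Pre_get_next_combination cs bs := by
          unfold Pre_get_next_combination; simpa using hpre
        have := ih bs hpre'
        simp only [get_next_combination, if_neg hc, this]
        unfold get_next_combination_alt
        simp only [altFind, if_neg hc]
        rw [show (1 : Nat) = 0 + 1 from rfl, altFind_shift]
        cases hf : altFind cs 0 with
        | none => simp
        | some p => cases p with | mk j v => simp [List.take_succ_cons, List.drop_succ_cons]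

-- ===== VERDICT (by name: the statement is the Claim_ definition above) =====
theorem get_next_combination_spec : Claim_equal_get_next_combination := by
  intro comb base _ hpre
  exact main_equiv comb base hpre
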